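-- pv_equiv track=rewrite | github.com/ChanMeng666/juejin-algorithm-practice | juejin18.py | solution
-- ===== SOURCE A (Python) =====
-- def solution(m: int, n: int, a: list) -> int:
--     # 定义方向：上下左右
--     directions = [(0, 1), (0, -1), (1, 0), (-1, 0)]
--     visited = set()
--     max_steps = [0]  # 使用列表存储最大步数，方便在递归中修改
--
--     def dfs(x: int, y: int, going_up: bool, steps: int):
--         max_steps[0] = max(max_steps[0], steps)
--
--         # 遍历四个方向
--         for dx, dy in directions:
--             new_x, new_y = x + dx, y + dy
--
--             # 检查新位置是否有效
--             if (new_x < 0 or new_x >= m or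
--                 new_y < 0 or new_y >= n or
--                 (new_x, new_y) in visited):
--                 continue
--
--             # 检查高度差是否符合上坡/下坡要求
--             if going_up and a[new_x][new_y] <= a[x][y]:
--                 continue
--             if not going_up and a[new_x][new_y] >= a[x][y]:
--                 continue
--
--             # 继续搜索
--             visited.add((new_x, new_y))
--             dfs(new_x, new_y, not going_up, steps + 1)
--             visited.remove((new_x, new_y))
--
--     # 从每个位置开始尝试
--     for i in range(m):
--         for j in range(n):
--             visited.add((i, j))
--             # 分别尝试从上坡和下坡开始
--             dfs(i, j, True, 0)
--             dfs(i, j, False, 0)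
--             visited.remove((i, j))
--
--     return max_steps[0]
-- ===== SOURCE B (Python) =====
-- def solution(m: int, n: int, a: list) -> int:
--     # Pure backtracking: best(x, y, s, seen) returns the longest remaining path whose
--     # next move must have sign s (s=+1: uphill, s=-1: downhill); seen is an immutable set.
--     def best(x, y, s, seen):
--         cands = [1 + best(nx, ny, -s, seen | {(nx, ny)})
--                  for nx, ny in ((x, y + 1), (x, y - 1), (x + 1, y), (x - 1, y))
--                  if 0 <= nx < m and 0 <= ny < n and (nx, ny) not in seen
--                  and s * (a[nx][ny] - a[x][y]) > 0]
--         return max(cands, default=0)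
--
--     return max((max(best(i, j, 1, {(i, j)}), best(i, j, -1, {(i, j)}))
--                 for i in range(m) for j in range(n)), default=0)
-- ===== Notes on version B (the rewrite author's own statement) =====
-- stated objective: simpler
-- what changed: The shared-mutation DFS (mutable visited set, threaded steps counter, max_steps cell) becomes a pure function: best(x,y,s,seen) builds a comprehension of 1+best over valid neighbours (validity is one sign test s*(a[nx][ny]-a[x][y])>0 merging the two up/down branches) and returns max(..., default=0) with an immutable seen set; the outer loop is a single max over a generator.
import Mathlib
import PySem

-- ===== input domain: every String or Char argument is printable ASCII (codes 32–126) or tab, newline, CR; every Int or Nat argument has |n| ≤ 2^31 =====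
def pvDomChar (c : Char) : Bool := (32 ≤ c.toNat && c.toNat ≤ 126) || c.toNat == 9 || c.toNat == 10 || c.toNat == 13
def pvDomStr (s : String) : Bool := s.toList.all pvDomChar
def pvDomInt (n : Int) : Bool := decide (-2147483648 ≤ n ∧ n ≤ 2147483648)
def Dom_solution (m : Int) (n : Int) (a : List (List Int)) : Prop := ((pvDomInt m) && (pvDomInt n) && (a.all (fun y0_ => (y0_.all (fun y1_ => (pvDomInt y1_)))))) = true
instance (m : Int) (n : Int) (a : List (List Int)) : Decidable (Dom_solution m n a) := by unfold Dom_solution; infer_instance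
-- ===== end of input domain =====

-- ===== PORT A =====
-- B replaces A's shared-mutation DFS (mutable visited, threaded steps, max_steps cell) by a
-- pure helper: a comprehension over valid neighbours (one sign test merges the up/down
-- branches) under max(..., default=0), with an immutable seen set (simpler; return value only).
-- directions = [(0,1),(0,-1),(1,0),(-1,0)]
def pvDirs : List (Int × Int) := [(0, 1), (0, -1), (1, 0), (-1, 0)]

-- a[x][y]; under Pre_solution every access performed is in range, so getD is exact
def pvCell (a : List (List Int)) (x y : Int) : Int :=
  (a.getD x.toNat []).getD y.toNat 0

-- dfs of A with the mutable state made explicit: visited is passed (add/remove = pass extended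
-- list only into the recursive call), max_steps is the threaded accumulator/result.
-- fuel only makes the recursion structural; it never runs out (depth ≤ m*n < fuel).
def pvDfsA (m n : Int) (a : List (List Int)) :
    Nat → Int → Int → Bool → Int → List (Int × Int) → Int → Int
  | 0, _, _, _, steps, _, ms => max ms steps
  | fuel+1, x, y, goingUp, steps, visited, ms =>
    pvDirs.foldl (fun ms d =>
      let nx := x + d.1
      let ny := y + d.2
      if nx < 0 ∨ nx ≥ m ∨ ny < 0 ∨ ny ≥ n ∨ (nx, ny) ∈ visited then ms
      else if goingUp = true ∧ pvCell a nx ny ≤ pvCell a x y then ms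
      else if goingUp = false ∧ pvCell a nx ny ≥ pvCell a x y then ms
      else pvDfsA m n a fuel nx ny (!goingUp) (steps + 1) ((nx, ny) :: visited) ms)
      (max ms steps)

def solution (m : Int) (n : Int) (a : List (List Int)) : Int :=
  (PySem.List.pyRange 0 m 1).foldl (fun ms i =>
    (PySem.List.pyRange 0 n 1).foldl (fun ms j =>
      let ms1 := pvDfsA m n a (m.toNat * n.toNat + 1) i j true 0 [(i, j)] ms
      pvDfsA m n a (m.toNat * n.toNat + 1) i j false 0 [(i, j)] ms1) ms) 0

-- ===== PORT B =====
-- the neighbour tuple ((x,y+1),(x,y-1),(x+1,y),(x-1,y)) of Source B's comprehension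
def pvNbrs (x y : Int) : List (Int × Int) := [(x, y + 1), (x, y - 1), (x + 1, y), (x - 1, y)]

-- best of Source B: the comprehension is filter (validity, one sign test) + map (1 + best),
-- and max(cands, default=0) is foldl max 0; seen is extended functionally; same fuel guard.
def pvBestB (m n : Int) (a : List (List Int)) :
    Nat → Int → Int → Int → List (Int × Int) → Int
  | 0, _, _, _, _ => 0
  | fuel+1, x, y, s, seen =>
    (((pvNbrs x y).filter (fun p =>
        decide (0 ≤ p.1) && decide (p.1 < m) && decide (0 ≤ p.2) && decide (p.2 < n) &&
        !(seen.contains p) &&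
        decide (s * ((a.getD p.1.toNat []).getD p.2.toNat 0 -
                     (a.getD x.toNat []).getD y.toNat 0) > 0))).map
      (fun p => 1 + pvBestB m n a fuel p.1 p.2 (-s) (p :: seen))).foldl max 0

def solution_alt (m : Int) (n : Int) (a : List (List Int)) : Int :=
  (((PySem.List.pyRange 0 m 1).flatMap (fun i =>
      (PySem.List.pyRange 0 n 1).map (fun j =>
        max (pvBestB m n a (m.toNat * n.toNat + 1) i j 1 [(i, j)])
            (pvBestB m n a (m.toNat * n.toNat + 1) i j (-1) [(i, j)])))).foldl max 0)

-- ===== PRECONDITION & SPEC =====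
-- Pre_ excludes exactly the inputs where Python A raises IndexError: when the grid has at least
-- two cells (so some a[x][y] is actually read), a must have at least m rows each of length ≥ n.
def Pre_solution (m : Int) (n : Int) (a : List (List Int)) : Prop :=
  (1 ≤ m ∧ 1 ≤ n ∧ 2 ≤ m * n) →
    (m ≤ (a.length : Int) ∧ ∀ row ∈ a.take m.toNat, n ≤ (row.length : Int))
instance (m : Int) (n : Int) (a : List (List Int)) : Decidable (Pre_solution m n a) := by
  unfold Pre_solution; infer_instance

def pvWitness_solution : Int × Int × List (List Int) := (1, 2, [[0, 1]])

def Spec_solution (m : Int) (n : Int) (a : List (List Int)) (out : Int) : Prop := out = solution_alt m n a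
instance (m : Int) (n : Int) (a : List (List Int)) (out : Int) : Decidable (Spec_solution m n a out) := by unfold Spec_solution; infer_instance

-- ===== CLAIM (what is proved, stated in full; the proofs are below) =====
def Claim_equal_solution : Prop := ∀ (m : Int) (n : Int) (a : List (List Int)), Dom_solution m n a → Pre_solution m n a → Spec_solution m n a (solution m n a)

-- ===== LEMMAS AND PROOFS =====

-- sign of g in B's encoding
def pvSg (g : Bool) : Int := if g then 1 else -1

theorem pvSg_not (g : Bool) : pvSg (!g) = -pvSg g := by cases g <;> decide

-- "skip or max with steps + w d" over l from a shifted seed = shift of max-fold over filter+map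
theorem pv_foldl_filter_max (c : (Int × Int) → Bool) (w : Int × Int → Int)
    (steps : Int) (l : List (Int × Int)) :
    ∀ ms b : Int,
      l.foldl (fun acc d => if c d then max acc (steps + w d) else acc) (max ms (steps + b)) =
      max ms (steps + ((l.filter c).map w).foldl max b) := by
  induction l with
  | nil => intro ms b; simp
  | cons d t ih =>
    intro ms b
    by_cases h : c d
    · simp only [List.foldl_cons, List.filter_cons, h]
      have e : max (max ms (steps + b)) (steps + w d) = max ms (steps + max b (w d)) := by omega
      rw [e]; exact ih ms (max b (w d))
    · simp only [List.foldl_cons, List.filter_cons, h]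
      simp only [Bool.false_eq_true, if_false]
      exact ih ms b

theorem pvNbrs_eq (x y : Int) :
    pvNbrs x y = pvDirs.map (fun d => (x + d.1, y + d.2)) := by
  simp [pvNbrs, pvDirs, sub_eq_add_neg]

-- main invariant: A's dfs = max of the incoming max_steps and steps + B's best
theorem pvDfsA_eq (m n : Int) (a : List (List Int)) :
    ∀ (fuel : Nat) (x y : Int) (g : Bool) (steps : Int)
      (visited : List (Int × Int)) (ms : Int),
      pvDfsA m n a fuel x y g steps visited ms
        = max ms (steps + pvBestB m n a fuel x y (pvSg g) visited) := by
  intro fuel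
  induction fuel with
  | zero => intro x y g steps visited ms; simp [pvDfsA, pvBestB]
  | succ fuel ih =>
    intro x y g steps visited ms
    -- B side rewritten as a fold over pvDirs
    have hB : pvBestB m n a (fuel+1) x y (pvSg g) visited
        = ((pvDirs.filter (fun d =>
              decide (0 ≤ x + d.1) && decide (x + d.1 < m) &&
              decide (0 ≤ y + d.2) && decide (y + d.2 < n) &&
              !(visited.contains (x + d.1, y + d.2)) &&
              decide (pvSg g * (pvCell a (x + d.1) (y + d.2) - pvCell a x y) > 0))).map
            (fun d => 1 + pvBestB m n a fuel (x + d.1) (y + d.2) (-(pvSg g))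
              ((x + d.1, y + d.2) :: visited))).foldl max 0 := by
      show (((pvNbrs x y).filter _).map _).foldl max 0 = _
      rw [pvNbrs_eq, List.filter_map, List.map_map]
      rfl
    rw [hB]
    -- A side: one fold over pvDirs in the "if c then max else skip" shape
    have hA : pvDfsA m n a (fuel+1) x y g steps visited ms
        = pvDirs.foldl (fun acc d =>
            if (decide (0 ≤ x + d.1) && decide (x + d.1 < m) &&
                decide (0 ≤ y + d.2) && decide (y + d.2 < n) &&
                !(visited.contains (x + d.1, y + d.2)) &&
                decide (pvSg g * (pvCell a (x + d.1) (y + d.2) - pvCell a x y) > 0)) = true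
            then max acc (steps +
              (1 + pvBestB m n a fuel (x + d.1) (y + d.2) (-(pvSg g))
                ((x + d.1, y + d.2) :: visited)))
            else acc)
          (max ms steps) := by
      show pvDirs.foldl _ (max ms steps) = _
      apply PySem.List.foldl_congr_mem
      intro acc d _
      simp only []
      rw [ih]
      rw [← pvSg_not]
      by_cases h1 : x + d.1 < 0 ∨ x + d.1 ≥ m ∨ y + d.2 < 0 ∨ y + d.2 ≥ n ∨ (x + d.1, y + d.2) ∈ visited
      · rw [if_pos h1]
        have : ¬ ((decide (0 ≤ x + d.1) && decide (x + d.1 < m) &&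
                decide (0 ≤ y + d.2) && decide (y + d.2 < n) &&
                !(visited.contains (x + d.1, y + d.2)) &&
                decide (pvSg g * (pvCell a (x + d.1) (y + d.2) - pvCell a x y) > 0)) = true) := by
          simp only [Bool.and_eq_true, decide_eq_true_eq, Bool.not_eq_true',
            List.contains_eq_mem, decide_eq_false_iff_not]
          rcases h1 with h | h | h | h | h <;> intro hh <;> [omega; omega; omega; omega; exact hh.1.2 h]
        rw [if_neg this]
      · rw [if_neg h1]
        push Not at h1
        obtain ⟨g1, g2, g3, g4, g5⟩ := h1
        cases g with
        | true =>
          by_cases h2 : pvCell a (x + d.1) (y + d.2) ≤ pvCell a x y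
          · rw [if_pos ⟨rfl, h2⟩]
            have : ¬ ((decide (0 ≤ x + d.1) && decide (x + d.1 < m) &&
                decide (0 ≤ y + d.2) && decide (y + d.2 < n) &&
                !(visited.contains (x + d.1, y + d.2)) &&
                decide (pvSg true * (pvCell a (x + d.1) (y + d.2) - pvCell a x y) > 0)) = true) := by
              simp only [Bool.and_eq_true, decide_eq_true_eq, pvSg]
              intro hh; have := hh.2; simp at this; omega
            rw [if_neg this]
          · rw [if_neg (by simp [h2]), if_neg (by simp)]
            have : ((decide (0 ≤ x + d.1) && decide (x + d.1 < m) &&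
                decide (0 ≤ y + d.2) && decide (y + d.2 < n) &&
                !(visited.contains (x + d.1, y + d.2)) &&
                decide (pvSg true * (pvCell a (x + d.1) (y + d.2) - pvCell a x y) > 0)) = true) := by
              simp only [Bool.and_eq_true, decide_eq_true_eq, Bool.not_eq_true',
                List.contains_eq_mem, decide_eq_false_iff_not, pvSg]
              refine ⟨⟨⟨⟨⟨by omega, by omega⟩, by omega⟩, by omega⟩, g5⟩, by simp; omega⟩
            rw [if_pos this]
            omega
        | false =>
          by_cases h2 : pvCell a (x + d.1) (y + d.2) ≥ pvCell a x y
          · rw [if_neg (by simp), if_pos ⟨rfl, h2⟩]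
            have : ¬ ((decide (0 ≤ x + d.1) && decide (x + d.1 < m) &&
                decide (0 ≤ y + d.2) && decide (y + d.2 < n) &&
                !(visited.contains (x + d.1, y + d.2)) &&
                decide (pvSg false * (pvCell a (x + d.1) (y + d.2) - pvCell a x y) > 0)) = true) := by
              simp only [Bool.and_eq_true, decide_eq_true_eq, pvSg]
              intro hh; have := hh.2; simp at this; omega
            rw [if_neg this]
          · rw [if_neg (by simp), if_neg (by simp [h2])]
            have : ((decide (0 ≤ x + d.1) && decide (x + d.1 < m) &&
                decide (0 ≤ y + d.2) && decide (y + d.2 < n) &&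
                !(visited.contains (x + d.1, y + d.2)) &&
                decide (pvSg false * (pvCell a (x + d.1) (y + d.2) - pvCell a x y) > 0)) = true) := by
              simp only [Bool.and_eq_true, decide_eq_true_eq, Bool.not_eq_true',
                List.contains_eq_mem, decide_eq_false_iff_not, pvSg]
              refine ⟨⟨⟨⟨⟨by omega, by omega⟩, by omega⟩, by omega⟩, g5⟩, by simp; omega⟩
            rw [if_pos this]
            omega
    rw [hA]
    have := pv_foldl_filter_max
      (fun d => decide (0 ≤ x + d.1) && decide (x + d.1 < m) &&
                decide (0 ≤ y + d.2) && decide (y + d.2 < n) &&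
                !(visited.contains (x + d.1, y + d.2)) &&
                decide (pvSg g * (pvCell a (x + d.1) (y + d.2) - pvCell a x y) > 0))
      (fun d => 1 + pvBestB m n a fuel (x + d.1) (y + d.2) (-(pvSg g))
                ((x + d.1, y + d.2) :: visited))
      steps pvDirs ms 0
    simpa using this

-- fold max over a flatMap = nested fold
theorem pv_foldl_max_flatMap {α : Type} (g : α → List Int) (l : List α) :
    ∀ s : Int, (l.flatMap g).foldl max s = l.foldl (fun acc i => (g i).foldl max acc) s := by
  induction l with
  | nil => intro s; rfl
  | cons x t ih => intro s; simp only [List.flatMap_cons, List.foldl_append, List.foldl_cons, ih]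

theorem solution_eq_alt (m n : Int) (a : List (List Int)) :
    solution m n a = solution_alt m n a := by
  unfold solution solution_alt
  rw [pv_foldl_max_flatMap]
  apply PySem.List.foldl_congr_mem
  intro ms i _
  rw [List.foldl_map]
  apply PySem.List.foldl_congr_mem
  intro acc j _
  simp only [pvDfsA_eq, pvSg, if_true, Bool.false_eq_true, if_false]
  omega

-- ===== VERDICT (by name: the statement is the Claim_ definition above) =====
theorem solution_spec : Claim_equal_solution := by
  intro m n a _ _
  unfold Spec_solution
  exact solution_eq_alt m n a
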